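-- pv_equiv track=rewrite | github.com/ludsmotika/Introduction_to_Python_FMI | third_homework/third_homework.py | _extract_and_sort_tones
-- ===== SOURCE A (Python) =====
-- VALID_TONES = (
--     'C', 'C#', 'D', 'D#', 'E', 'F',
--     'F#', 'G', 'G#', 'A', 'A#', 'B'
-- )
--
-- def rearrange_tuple(input_tuple, skip_index):
--     start_index = skip_index + 1
--     end_index = skip_index - 1
--
--
--     if start_index <= end_index:
--         result_tuple = input_tuple[start_index:end_index + 1]
--     else:
--         result_tuple = input_tuple[start_index:] + input_tuple[:end_index + 1]
--
--     if skip_index is not None: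
--         skip_tone = input_tuple[skip_index]
--         result_tuple = [tone for tone in result_tuple if tone != skip_tone]
--
--     return result_tuple
--
-- def _extract_and_sort_tones(main_tone, secondary_tones=None):
--
--     if secondary_tones is None:
--         return list(main_tone)
--
--     unique_secondary_tones = set(filter(lambda tone: str(tone) != str(main_tone), secondary_tones))
--     unique_secondary_tones_strs = [str(tone) for tone in unique_secondary_tones]
--
--     main_tone_index = VALID_TONES.index(str(main_tone))
--     rearranged_tones = rearrange_tuple(VALID_TONES, main_tone_index)
--
--     sorted_tones = [main_tone]
--
--     for tone in rearranged_tones: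
--         if tone in unique_secondary_tones_strs:
--             sorted_tones.append(next((t for t in unique_secondary_tones if str(t) == tone)))
--
--     return sorted_tones
-- ===== SOURCE B (Python) =====
-- VALID_TONES = (
--     'C', 'C#', 'D', 'D#', 'E', 'F',
--     'F#', 'G', 'G#', 'A', 'A#', 'B'
-- )
--
-- def _extract_and_sort_tones(main_tone, secondary_tones=None):
--     if secondary_tones is None:
--         return list(main_tone)
--     main_index = VALID_TONES.index(main_tone)
--     chosen = [t for t in set(secondary_tones) if t in VALID_TONES and t != main_tone]
--     chosen.sort(key=lambda t: (VALID_TONES.index(t) - main_index) % 12)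
--     return [main_tone] + chosen
-- ===== Notes on version B (the rewrite author's own statement) =====
-- stated objective: simpler
-- what changed: Instead of rotating the VALID_TONES table and scanning each rotated tone for membership in the deduplicated secondaries, B deduplicates once and sorts the valid secondaries by their chromatic offset (index - main_index) mod 12.
import Mathlib
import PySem

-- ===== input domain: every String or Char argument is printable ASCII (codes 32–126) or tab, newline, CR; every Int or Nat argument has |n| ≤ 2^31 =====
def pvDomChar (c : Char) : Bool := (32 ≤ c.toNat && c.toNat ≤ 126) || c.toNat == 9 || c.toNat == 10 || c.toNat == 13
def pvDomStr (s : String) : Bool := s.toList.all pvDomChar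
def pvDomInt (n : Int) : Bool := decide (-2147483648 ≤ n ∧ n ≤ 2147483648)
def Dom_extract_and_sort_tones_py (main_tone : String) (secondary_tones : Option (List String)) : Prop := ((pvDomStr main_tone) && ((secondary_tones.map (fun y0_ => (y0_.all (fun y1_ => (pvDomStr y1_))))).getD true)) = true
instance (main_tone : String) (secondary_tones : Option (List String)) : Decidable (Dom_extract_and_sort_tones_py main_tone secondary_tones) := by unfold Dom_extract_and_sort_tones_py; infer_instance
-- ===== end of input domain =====

-- B replaces A's rotate-the-table-and-scan with a single sort of the deduplicated
-- valid secondaries by chromatic offset (index - main_index) mod 12; same results, simpler.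

-- ===== PORT A =====
def pvVALID_TONES : List String :=
  ["C", "C#", "D", "D#", "E", "F", "F#", "G", "G#", "A", "A#", "B"]

def rearrange_tuple_py (input_tuple : List String) (skip_index : Int) : List String :=
  let start_index := skip_index + 1
  let end_index := skip_index - 1
  let result_tuple :=
    if start_index ≤ end_index then
      PySem.List.slice input_tuple (some start_index) (some (end_index + 1))
    else
      PySem.List.slice input_tuple (some start_index) none ++
        PySem.List.slice input_tuple none (some (end_index + 1))
  -- 'if skip_index is not None' is always true here (skip_index : Int)
  match PySem.List.pyGet? input_tuple skip_index with
  | none => []   -- IndexError; unreachable at the only call site (skip_index is a valid index)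
  | some skip_tone => result_tuple.filter (fun tone => tone ≠ skip_tone)

-- tones are strings under the type convention, so str(tone) is tone itself;
-- iteration over the Python set only feeds a membership list and next(t for t with str(t)==tone),
-- whose results are independent of the set's iteration order, so PySem.Set.ofList is exact.
def extract_and_sort_tones_py (main_tone : String) (secondary_tones : Option (List String)) : List String :=
  match secondary_tones with
  | none => main_tone.toList.map (fun c => String.ofList [c])   -- list(main_tone)
  | some sts =>
    let unique_secondary_tones : PySem.Set String :=
      PySem.Set.ofList (sts.filter (fun tone => tone ≠ main_tone))
    let unique_secondary_tones_strs : List String :=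
      unique_secondary_tones.map (fun tone => tone)
    match PySem.List.index? pvVALID_TONES main_tone with
    | none => []   -- ValueError; excluded by Pre_
    | some main_tone_index =>
      let rearranged_tones := rearrange_tuple_py pvVALID_TONES (main_tone_index : Int)
      rearranged_tones.foldl (fun sorted_tones tone =>
        if unique_secondary_tones_strs.contains tone then
          -- next((t for t in unique_secondary_tones if str(t) == tone)); guarded, so getD is unreachable
          sorted_tones ++ [(unique_secondary_tones.find? (fun t => t == tone)).getD tone]
        else sorted_tones) [main_tone]

-- ===== PORT B =====
def extract_and_sort_tones_py_alt (main_tone : String) (secondary_tones : Option (List String)) : List String :=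
  match secondary_tones with
  | none => main_tone.toList.map (fun c => String.ofList [c])   -- list(main_tone)
  | some sts =>
    match PySem.List.index? pvVALID_TONES main_tone with
    | none => []   -- ValueError; excluded by Pre_
    | some main_index =>
      let chosen := (PySem.Set.ofList sts).filter
        (fun t => pvVALID_TONES.contains t && t != main_tone)
      let sortedChosen := PySem.List.sorted chosen
        (fun t => PySem.Int.mod ((((PySem.List.index? pvVALID_TONES t).getD 0 : Nat) : Int)
                                  - (main_index : Int)) 12)
      [main_tone] ++ sortedChosen

-- ===== PRECONDITION & SPEC =====
-- Pre_ excludes exactly the inputs where A raises ValueError: a secondary_tones list given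
-- while main_tone is not one of the 12 VALID_TONES strings.
def Pre_extract_and_sort_tones_py (main_tone : String) (secondary_tones : Option (List String)) : Prop :=
  secondary_tones = none ∨ main_tone ∈ pvVALID_TONES
instance (main_tone : String) (secondary_tones : Option (List String)) : Decidable (Pre_extract_and_sort_tones_py main_tone secondary_tones) := by unfold Pre_extract_and_sort_tones_py; infer_instance

def pvWitness_extract_and_sort_tones_py : String × Option (List String) :=
  ("C", some ["B", "D", "C", "X", "D"])

def Spec_extract_and_sort_tones_py (main_tone : String) (secondary_tones : Option (List String)) (out : List String) : Prop := out = extract_and_sort_tones_py_alt main_tone secondary_tones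
instance (main_tone : String) (secondary_tones : Option (List String)) (out : List String) : Decidable (Spec_extract_and_sort_tones_py main_tone secondary_tones out) := by unfold Spec_extract_and_sort_tones_py; infer_instance

-- ===== CLAIM (what is proved, stated in full; the proofs are below) =====
def Claim_equal_extract_and_sort_tones_py : Prop := ∀ (main_tone : String) (secondary_tones : Option (List String)), Dom_extract_and_sort_tones_py main_tone secondary_tones → Pre_extract_and_sort_tones_py main_tone secondary_tones → Spec_extract_and_sort_tones_py main_tone secondary_tones (extract_and_sort_tones_py main_tone secondary_tones)

-- ===== LEMMAS AND PROOFS =====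

-- the guarded next(...) always yields the tone itself (tones are strings)
theorem pv_find?_getD_self (l : List String) (t : String) :
    ((l.find? (fun x => x == t)).getD t) = t := by
  induction l with
  | nil => rfl
  | cons a l ih =>
    by_cases h : a = t <;> simp [h, ih]

-- one lemma covering every valid main tone; all side conditions are decidable facts
-- about the concrete 12-tone table and the concrete rotated list R
theorem pv_case (mt : String) (i : Nat)
    (hix : PySem.List.index? pvVALID_TONES mt = some i)
    (R : List String)
    (hR : rearrange_tuple_py pvVALID_TONES (i : Int) = R)
    (hsub : ∀ t ∈ R, t ∈ pvVALID_TONES ∧ t ≠ mt)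
    (hsup : ∀ t ∈ pvVALID_TONES, t ≠ mt → t ∈ R)
    (hnd : R.Nodup)
    (hpw : R.Pairwise (fun a b =>
      PySem.Int.mod ((((PySem.List.index? pvVALID_TONES a).getD 0 : Nat) : Int) - (i : Int)) 12 <
      PySem.Int.mod ((((PySem.List.index? pvVALID_TONES b).getD 0 : Nat) : Int) - (i : Int)) 12))
    (l : List String) :
    extract_and_sort_tones_py mt (some l) = extract_and_sort_tones_py_alt mt (some l) := by
  unfold extract_and_sort_tones_py extract_and_sort_tones_py_alt
  rw [hix]
  simp only [hR]
  set uniq : PySem.Set String := PySem.Set.ofList (l.filter (fun tone => tone ≠ mt)) with huniq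
  have hmapid : uniq.map (fun tone => tone) = uniq := List.map_id' uniq
  rw [hmapid]
  rw [show (R.foldl (fun sorted_tones tone =>
        if List.contains uniq tone then
          sorted_tones ++ [(uniq.find? (fun t => t == tone)).getD tone]
        else sorted_tones) [mt])
      = [mt] ++ (R.filter (fun tone => List.contains uniq tone)).map
          (fun tone => (uniq.find? (fun t => t == tone)).getD tone)
    from PySem.List.foldl_append_if _ _ R [mt]]
  have hmap : (R.filter (fun tone => List.contains uniq tone)).map
      (fun tone => (uniq.find? (fun t => t == tone)).getD tone)
      = R.filter (fun tone => List.contains uniq tone) := by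
    rw [List.map_congr_left (fun t _ => pv_find?_getD_self uniq t)]
    exact List.map_id' _
  rw [hmap]
  congr 1
  refine (PySem.List.sorted_eq_of_perm_of_pairwise_lt _ _ _ ?_ ?_).symm
  · refine (List.perm_ext_iff_of_nodup (List.Nodup.filter _ hnd)
      (List.Nodup.filter _ (PySem.Set.nodup_ofList l))).mpr ?_
    intro t
    simp only [List.mem_filter, huniq, PySem.Set.mem_ofList, List.contains_eq_mem,
      Bool.and_eq_true, bne_iff_ne, decide_eq_true_eq]
    constructor
    · rintro ⟨htR, htl, hne⟩
      exact ⟨htl, (hsub t htR).1, hne⟩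
    · rintro ⟨htl, htVT, hne⟩
      exact ⟨hsup t htVT hne, htl, hne⟩
  · exact List.Pairwise.filter _ hpw

-- ===== VERDICT (by name: the statement is the Claim_ definition above) =====
theorem extract_and_sort_tones_py_spec : Claim_equal_extract_and_sort_tones_py := by
  intro mt sts _ hpre
  show extract_and_sort_tones_py mt sts = extract_and_sort_tones_py_alt mt sts
  cases sts with
  | none => rfl
  | some l =>
    have hm : mt ∈ pvVALID_TONES := by
      rcases hpre with h | h
      · exact absurd h (by simp)
      · exact h
    simp only [pvVALID_TONES, List.mem_cons, List.not_mem_nil, or_false] at hm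
    rcases hm with rfl | rfl | rfl | rfl | rfl | rfl | rfl | rfl | rfl | rfl | rfl | rfl
    · exact pv_case _ 0 (by decide) _ rfl (by decide) (by decide) (by decide) (by decide) l
    · exact pv_case _ 1 (by decide) _ rfl (by decide) (by decide) (by decide) (by decide) l
    · exact pv_case _ 2 (by decide) _ rfl (by decide) (by decide) (by decide) (by decide) l
    · exact pv_case _ 3 (by decide) _ rfl (by decide) (by decide) (by decide) (by decide) l
    · exact pv_case _ 4 (by decide) _ rfl (by decide) (by decide) (by decide) (by decide) l
    · exact pv_case _ 5 (by decide) _ rfl (by decide) (by decide) (by decide) (by decide) l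
    · exact pv_case _ 6 (by decide) _ rfl (by decide) (by decide) (by decide) (by decide) l
    · exact pv_case _ 7 (by decide) _ rfl (by decide) (by decide) (by decide) (by decide) l
    · exact pv_case _ 8 (by decide) _ rfl (by decide) (by decide) (by decide) (by decide) l
    · exact pv_case _ 9 (by decide) _ rfl (by decide) (by decide) (by decide) (by decide) l
    · exact pv_case _ 10 (by decide) _ rfl (by decide) (by decide) (by decide) (by decide) l
    · exact pv_case _ 11 (by decide) _ rfl (by decide) (by decide) (by decide) (by decide) l
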